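-- pv_equiv track=rewrite | github.com/iamkanguk97/Algorithm | 프로그래머스/LV2/주식가격/주식가격-다른풀이.py | solution
-- ===== SOURCE A (Python) =====
-- from collections import deque
--
-- def solution(prices):
--     queue = deque(prices)   # queue로 지정
--     result = []
--
--     while queue:   # queue에 data가 있는동안
--         price = queue.popleft()   # 시간 순서대로의 price를 pop한다
--         time = 0   # 시간 변수
--
--         for p in queue:   # 첫 가격 빼고 남은 데이터들 반복문 순회
--             time += 1   # 시간 1 추가
--             if price > p:   # 감소세가 보이면
--                break
--         result.append(time)
--
--     return result
-- ===== SOURCE B (Python) =====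
-- def solution(prices):
--     n = len(prices)
--     result = [n - 1 - i for i in range(n)]  # default: price never drops
--     stack = []  # indices with unresolved answers; prices non-increasing bottom-to-top? (non-decreasing upward)
--     for j in range(n):
--         p = prices[j]
--         while stack and prices[stack[-1]] > p:
--             i = stack.pop()
--             result[i] = j - i
--         stack.append(j)
--     return result
-- ===== Notes on version B (the rewrite author's own statement) =====
-- stated objective: faster
-- what changed: Replaces A's quadratic rescan of the remaining queue for every element by a single left-to-right pass with a monotonic stack of indices whose answers are resolved on pop.
import Mathlib
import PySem

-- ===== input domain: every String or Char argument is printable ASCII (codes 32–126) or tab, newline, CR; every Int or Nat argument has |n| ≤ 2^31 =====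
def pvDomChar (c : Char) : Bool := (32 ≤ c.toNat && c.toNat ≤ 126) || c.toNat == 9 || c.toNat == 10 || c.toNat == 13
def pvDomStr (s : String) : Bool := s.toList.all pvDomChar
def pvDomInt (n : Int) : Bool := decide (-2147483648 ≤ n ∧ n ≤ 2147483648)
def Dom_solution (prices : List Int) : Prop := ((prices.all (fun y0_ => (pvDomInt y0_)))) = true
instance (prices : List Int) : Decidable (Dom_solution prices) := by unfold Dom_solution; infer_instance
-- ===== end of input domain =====

-- B replaces A's quadratic rescan of the remaining queue by a monotonic stack of indices
-- resolved on pop (O(n)); same return value on every input.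

-- ===== PORT A =====
-- inner 'for p in queue: time += 1; if price > p: break'
def timeA (price : Int) : List Int → Int → Int
  | [], t => t
  | p :: ps, t => if price > p then t + 1 else timeA price ps (t + 1)

-- outer 'while queue: price = queue.popleft(); …; result.append(time)'
def solution : List Int → List Int
  | [] => []
  | q :: qs => timeA q qs 0 :: solution qs

-- ===== PORT B =====
-- 'while stack and prices[stack[-1]] > p: i = stack.pop(); result[i] = j - i'
-- (stack is head-is-top; loop indices are the nonnegative ints of range(n), modelled as Nat)
def popB (P : List Int) (p : Int) (j : Nat) : List Int → List Nat → List Int × List Nat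
  | res, [] => (res, [])
  | res, i :: s =>
    if P.getD i 0 > p then popB P p j (res.set i ((j : Int) - (i : Int))) s else (res, i :: s)

-- one iteration of 'for j in range(n)'
def stepB (P : List Int) (st : List Int × List Nat) (j : Nat) : List Int × List Nat :=
  let st' := popB P (P.getD j 0) j st.1 st.2
  (st'.1, j :: st'.2)

def solution_alt (prices : List Int) : List Int :=
  ((List.range prices.length).foldl (stepB prices)
    ((List.range prices.length).map (fun i : Nat => (prices.length : Int) - 1 - (i : Int)), [])).1

-- ===== PRECONDITION & SPEC =====
def Spec_solution (prices : List Int) (out : List Int) : Prop := out = solution_alt prices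
instance (prices : List Int) (out : List Int) : Decidable (Spec_solution prices out) := by unfold Spec_solution; infer_instance

-- ===== CLAIM (what is proved, stated in full; the proofs are below) =====
def Claim_equal_solution : Prop := ∀ (prices : List Int), Dom_solution prices → Spec_solution prices (solution prices)

-- ===== LEMMAS AND PROOFS =====

-- index (in xs) of the first element strictly below price
def firstS (price : Int) : List Int → Option Nat
  | [] => none
  | x :: xs => if x < price then some 0 else (firstS price xs).map (· + 1)

-- the common specification: answer for position i
def target (P : List Int) (i : Nat) : Int :=
  match firstS (P.getD i 0) (P.drop (i + 1)) with
  | some k => (k : Int) + 1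
  | none => (P.length : Int) - 1 - (i : Int)

theorem timeA_eq (price : Int) (qs : List Int) : ∀ t : Int,
    timeA price qs t = t + (match firstS price qs with
      | some k => (k : Int) + 1
      | none => (qs.length : Int)) := by
  induction qs with
  | nil => intro t; simp [timeA, firstS]
  | cons x xs ih =>
    intro t
    by_cases h : x < price
    · simp [timeA, firstS, h]
    · have h' : ¬ price > x := h
      simp only [timeA, firstS, if_neg h]
      rw [ih]
      cases firstS price xs with
      | none => simp; ring
      | some k => simp; ring

theorem solution_length (P : List Int) : (solution P).length = P.length := by
  induction P with
  | nil => rfl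
  | cons q qs ih => simp [solution, ih]

theorem solution_getD (P : List Int) : ∀ i : Nat, i < P.length →
    (solution P).getD i 0 = target P i := by
  induction P with
  | nil => intro i h; simp at h
  | cons q qs ih =>
    intro i hi
    cases i with
    | zero =>
      simp only [solution, List.getD_cons_zero, target]
      rw [timeA_eq]
      simp only [List.drop_succ_cons, List.drop_zero]
      cases firstS q qs with
      | none => simp
      | some k => simp
    | succ i =>
      simp only [solution, List.getD_cons_succ]
      rw [ih i (by simpa using hi)]
      simp only [target, List.getD_cons_succ, List.drop_succ_cons]
      cases firstS (qs.getD i 0) (qs.drop (i + 1)) with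
      | none => simp; push_cast; ring
      | some k => simp

theorem firstS_eq_none (price : Int) (xs : List Int)
    (h : ∀ l, l < xs.length → ¬ xs.getD l 0 < price) : firstS price xs = none := by
  induction xs with
  | nil => rfl
  | cons x t ih =>
    have hx : ¬ x < price := by simpa using h 0 (by simp)
    simp only [firstS, if_neg hx]
    rw [ih (fun l hl => by simpa using h (l + 1) (by simpa using hl))]
    rfl

theorem firstS_eq_some (price : Int) (xs : List Int) : ∀ k : Nat, k < xs.length →
    xs.getD k 0 < price → (∀ l, l < k → ¬ xs.getD l 0 < price) →
    firstS price xs = some k := by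
  induction xs with
  | nil => intro k hk; simp at hk
  | cons x t ih =>
    intro k hk hsm hbef
    cases k with
    | zero => simp only [firstS]; rw [if_pos (by simpa using hsm)]
    | succ k =>
      have hx : ¬ x < price := by simpa using hbef 0 (Nat.succ_pos _)
      simp only [firstS, if_neg hx]
      rw [ih k (by simpa using hk) (by simpa using hsm)
        (fun l hl => by simpa using hbef (l + 1) (by omega))]
      rfl

theorem getD_drop (P : List Int) (m l : Nat) (h : m + l < P.length) :
    (P.drop m).getD l 0 = P.getD (m + l) 0 := by
  rw [List.getD_eq_getElem?_getD, List.getD_eq_getElem?_getD, List.getElem?_drop]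

theorem getD_set_ne (res : List Int) (i i' : Nat) (v : Int) (h : i ≠ i') :
    (res.set i v).getD i' 0 = res.getD i' 0 := by
  rw [List.getD_eq_getElem?_getD, List.getD_eq_getElem?_getD, List.getElem?_set_ne h]

theorem init_getD (n i : Nat) (hi : i < n) :
    ((List.range n).map (fun k : Nat => (n : Int) - 1 - (k : Int))).getD i 0
      = (n : Int) - 1 - (i : Int) := by
  simp [List.getD_eq_getElem?_getD, List.getElem?_map, List.getElem?_range hi]

-- the fold invariant for B
def BInv (P : List Int) (j : Nat) (res : List Int) (stack : List Nat) : Prop :=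
  res.length = P.length ∧
  (∀ i ∈ stack, i < j) ∧
  stack.Pairwise (fun a b => b < a ∧ P.getD b 0 ≤ P.getD a 0) ∧
  (∀ i ∈ stack, ∀ l, i < l → l < j → ¬ (P.getD l 0 < P.getD i 0)) ∧
  (∀ i, i < P.length → i ∉ stack → i < j → res.getD i 0 = target P i) ∧
  (∀ i, i < P.length → (i ∈ stack ∨ j ≤ i) → res.getD i 0 = (P.length : Int) - 1 - (i : Int))

theorem popB_spec (P : List Int) (j : Nat) (hj : j < P.length) :
    ∀ (stack : List Nat) (res : List Int), BInv P j res stack →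
      BInv P j (popB P (P.getD j 0) j res stack).1 (popB P (P.getD j 0) j res stack).2 ∧
      (∀ i ∈ (popB P (P.getD j 0) j res stack).2, ¬ (P.getD j 0 < P.getD i 0)) ∧
      (popB P (P.getD j 0) j res stack).2.Sublist stack := by
  intro stack
  induction stack with
  | nil => intro res hInv; exact ⟨hInv, by simp [popB], by simp [popB]⟩
  | cons i s ih =>
    intro res hInv
    obtain ⟨hlen, hlt, hpw, hnos, hdone, hdef⟩ := hInv
    have hpw' := List.pairwise_cons.mp hpw
    by_cases hc : P.getD i 0 > P.getD j 0
    · have heq : popB P (P.getD j 0) j res (i :: s)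
          = popB P (P.getD j 0) j (res.set i ((j : Int) - (i : Int))) s := by
        simp only [popB, if_pos hc]
      have hij : i < j := hlt i (by simp)
      have hin : i < P.length := lt_trans hij hj
      have hres2 : BInv P j (res.set i ((j : Int) - (i : Int))) s := by
        refine ⟨by simpa using hlen, fun a ha => hlt a (by simp [ha]), hpw'.2,
          fun a ha l h1 h2 => hnos a (by simp [ha]) l h1 h2, ?_, ?_⟩
        · intro i' hi' hni' hij'
          by_cases he : i' = i
          · subst he
            have hset : (res.set i' ((j : Int) - (i' : Int))).getD i' 0
                = (j : Int) - (i' : Int) := by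
              rw [List.getD_eq_getElem?_getD, List.getElem?_set_self (by omega)]
              rfl
            rw [hset]
            have hfs : firstS (P.getD i' 0) (P.drop (i' + 1)) = some (j - i' - 1) := by
              apply firstS_eq_some
              · simpa [List.length_drop] using (by omega : j - i' - 1 < P.length - (i' + 1))
              · rw [getD_drop P (i' + 1) (j - i' - 1) (by omega)]
                have h2 : i' + 1 + (j - i' - 1) = j := by omega
                rw [h2]; exact hc
              · intro l hl
                rw [getD_drop P (i' + 1) l (by omega)]
                exact hnos i' (by simp) (i' + 1 + l) (by omega) (by omega)
            rw [target, hfs]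
            push_cast [Nat.cast_sub (by omega : i' + 1 ≤ j)]
            ring_nf
            omega
          · rw [getD_set_ne res i i' _ (fun h => he h.symm)]
            exact hdone i' hi' (by simp [he, hni']) hij'
        · intro i' hi' hca
          have hne : i ≠ i' := by
            rcases hca with hmem | hge
            · intro h
              have := (hpw'.1 i' hmem).1
              omega
            · intro h; omega
          rw [getD_set_ne res i i' _ hne]
          refine hdef i' hi' ?_
          rcases hca with h | h
          · exact Or.inl (by simp [h])
          · exact Or.inr h
      obtain ⟨h1, h2, h3⟩ := ih (res.set i ((j : Int) - (i : Int))) hres2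
      rw [heq]
      exact ⟨h1, h2, h3.trans (List.sublist_cons_self i s)⟩
    · have heq : popB P (P.getD j 0) j res (i :: s) = (res, i :: s) := by
        simp only [popB, if_neg hc]
      rw [heq]
      refine ⟨⟨hlen, hlt, hpw, hnos, hdone, hdef⟩, ?_, List.Sublist.refl _⟩
      intro a ha
      rcases List.mem_cons.mp ha with h | h
      · subst h; omega
      · have := (hpw'.1 a h).2
        omega

theorem stepB_inv (P : List Int) (j : Nat) (hj : j < P.length) (res : List Int)
    (stack : List Nat) (hInv : BInv P j res stack) :
    BInv P (j + 1) (stepB P (res, stack) j).1 (stepB P (res, stack) j).2 := by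
  obtain ⟨hInv', hnotlt, hsub⟩ := popB_spec P j hj stack res hInv
  obtain ⟨hlen, hlt, hpw, hnos, hdone, hdef⟩ := hInv'
  have hlt' : ∀ i ∈ (popB P (P.getD j 0) j res stack).2, i < j := fun i hi =>
    (hInv.2.1) i (hsub.mem hi)
  refine ⟨hlen, ?_, ?_, ?_, ?_, ?_⟩
  · intro i hi
    rcases List.mem_cons.mp hi with h | h
    · omega
    · exact lt_trans (hlt' i h) (by omega)
  · exact List.pairwise_cons.mpr
      ⟨fun a ha => ⟨hlt' a ha, by have := hnotlt a ha; omega⟩, hpw⟩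
  · intro i hi l h1 h2
    rcases List.mem_cons.mp hi with h | h
    · subst h; omega
    · by_cases hl : l = j
      · subst hl; exact hnotlt i h
      · exact hnos i h l h1 (by omega)
  · intro i hi hni hij
    by_cases he : i = j
    · exact absurd (he ▸ List.mem_cons_self ..) hni
    · exact hdone i hi (fun h => hni (List.mem_cons_of_mem _ h)) (by omega)
  · intro i hi hca
    apply hdef i hi
    rcases hca with h | h
    · rcases List.mem_cons.mp h with h' | h'
      · subst h'; exact Or.inr le_rfl
      · exact Or.inl h'
    · exact Or.inr (by omega)

theorem fold_inv (P : List Int) : ∀ j : Nat, j ≤ P.length →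
    BInv P j
      (((List.range j).foldl (stepB P)
        ((List.range P.length).map (fun i : Nat => (P.length : Int) - 1 - (i : Int)), [])).1)
      (((List.range j).foldl (stepB P)
        ((List.range P.length).map (fun i : Nat => (P.length : Int) - 1 - (i : Int)), [])).2) := by
  intro j
  induction j with
  | zero =>
    intro _
    simp only [List.range_zero, List.foldl_nil]
    exact ⟨by simp, by simp, by simp, by simp,
      fun i hi hni h => absurd h (by omega),
      fun i hi _ => init_getD P.length i hi⟩
  | succ j ih =>
    intro hj
    rw [List.range_succ, List.foldl_append, List.foldl_cons, List.foldl_nil]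
    exact stepB_inv P j (by omega) _ _ (ih (by omega))

theorem alt_getD (P : List Int) :
    (solution_alt P).length = P.length ∧
    ∀ i : Nat, i < P.length → (solution_alt P).getD i 0 = target P i := by
  obtain ⟨hlen, _hlt, _hpw, hnos, hdone, hdef⟩ := fold_inv P P.length le_rfl
  refine ⟨hlen, fun i hi => ?_⟩
  by_cases hmem : i ∈ ((List.range P.length).foldl (stepB P)
      ((List.range P.length).map (fun k : Nat => (P.length : Int) - 1 - (k : Int)), [])).2
  · have h1 : (solution_alt P).getD i 0 = (P.length : Int) - 1 - (i : Int) :=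
      hdef i hi (Or.inl hmem)
    have hfs : firstS (P.getD i 0) (P.drop (i + 1)) = none := by
      apply firstS_eq_none
      intro l hl
      simp only [List.length_drop] at hl
      rw [getD_drop P (i + 1) l (by omega)]
      exact hnos i hmem (i + 1 + l) (by omega) (by omega)
    rw [h1, target, hfs]
  · exact hdone i hi hmem hi

-- ===== VERDICT (by name: the statement is the Claim_ definition above) =====
theorem solution_spec : Claim_equal_solution := by
  intro P _
  show solution P = solution_alt P
  obtain ⟨hlen, hgd⟩ := alt_getD P
  apply List.ext_getElem (by rw [solution_length, hlen])
  intro i h1 h2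
  have hi : i < P.length := by rwa [solution_length] at h1
  have ha : (solution P)[i] = (solution P).getD i 0 := (List.getD_eq_getElem _ _ h1).symm
  have hb : (solution_alt P)[i] = (solution_alt P).getD i 0 := (List.getD_eq_getElem _ _ h2).symm
  rw [ha, hb, solution_getD P i hi, hgd i hi]
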